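-- pv_equiv track=rewrite | github.com/LBognanni/AdventOfCode2022-python | aoc/day15/part2.py | get_possible_x_range
-- ===== SOURCE A (Python) =====
-- from typing import Iterable
--
-- def get_possible_x_range(sensors:list[tuple[tuple[int,int], int, int]], y: int, areaSize: int) -> Iterable[int]:
--     # get min-max x ranges for all sensors
--     ranges = [get_area_line(s, y) for s in sensors]
--
--     # merge &  invert ranges
--     x = 0
--     while x <= areaSize:
--         possibles = filter(lambda r: any(r) and (x >= r[0] and x <= r[1]), ranges)
--         x1 = max(map(lambda r: r[1], possibles), default=-1)
--         if x < x1: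
--             x = x1
--         else:
--             yield x
--         x += 1
--
-- def get_area_line(sensor: tuple[tuple[int, int], int], y: int) -> list[int, int]:
--     (px,py) = sensor[0]
--     d = sensor[1]
--     if py - d > y:
--         return[]
--     if py + d < y:
--         return[]
--
--     dd = d - abs(py - y)
--     return [px - dd, px + dd]
-- ===== SOURCE B (Python) =====
-- def get_possible_x_range(sensors, y, areaSize):
--     # collect the sensors' covered x-intervals on row y, sort by left end,
--     # then sweep once with a running max of right ends
--     ivals = []
--     for (px, py), d, _ in sensors:
--         dd = d - abs(py - y)
--         if dd >= 0:
--             ivals.append((px - dd, px + dd))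
--     ivals.sort(key=lambda t: t[0])
--     x = 0
--     i = 0
--     max_end = -1
--     while x <= areaSize:
--         while i < len(ivals) and ivals[i][0] <= x:
--             if ivals[i][1] > max_end:
--                 max_end = ivals[i][1]
--             i += 1
--         if max_end > x:
--             x = max_end + 1
--         else:
--             yield x
--             x += 1
-- ===== Notes on version B (the rewrite author's own statement) =====
-- stated objective: faster
-- what changed: B replaces A's per-position filter over all sensor ranges (a full O(n) scan at every visited x) by sorting the row intervals by left end once and sweeping with a pointer and a running maximum right end, so each interval is examined once.
import Mathlib
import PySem

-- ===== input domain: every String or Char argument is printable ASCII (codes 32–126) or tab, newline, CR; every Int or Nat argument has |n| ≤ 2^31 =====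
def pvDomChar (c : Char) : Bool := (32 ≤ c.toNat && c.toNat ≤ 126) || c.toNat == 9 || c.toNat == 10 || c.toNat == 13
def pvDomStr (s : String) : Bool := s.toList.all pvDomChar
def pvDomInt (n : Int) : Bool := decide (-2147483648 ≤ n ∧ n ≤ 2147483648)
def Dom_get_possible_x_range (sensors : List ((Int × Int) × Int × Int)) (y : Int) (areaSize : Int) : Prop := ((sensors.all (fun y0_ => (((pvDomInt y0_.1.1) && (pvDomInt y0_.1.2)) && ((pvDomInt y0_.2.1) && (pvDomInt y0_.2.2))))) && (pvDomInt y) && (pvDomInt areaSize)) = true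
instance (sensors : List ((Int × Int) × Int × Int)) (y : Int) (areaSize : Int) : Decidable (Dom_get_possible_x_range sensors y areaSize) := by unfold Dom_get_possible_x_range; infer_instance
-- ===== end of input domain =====

-- B replaces A's per-position scan of all sensor ranges by a single sort-by-left-end
-- sweep that keeps a running maximum right end (objective: faster).

-- ===== PORT A =====
-- get_area_line, transliterated
def pvAreaLineA (sensor : (Int × Int) × Int × Int) (y : Int) : List Int :=
  let px := sensor.1.1
  let py := sensor.1.2
  let d := sensor.2.1
  if py - d > y then []
  else if py + d < y then []
  else
    let dd := d - |py - y|
    [px - dd, px + dd]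

-- A's while-loop; Python's max(..., default=-1) is PySem.List.maxD.
-- r[0]/r[1] are read with List.getD: they are evaluated only after `any(r)` succeeds,
-- and every list get_area_line produces has length 0 or 2, so getD is exact there.
-- one iteration's filter + max: `possibles` and `x1` of A's loop body
def pvStepA (ranges : List (List Int)) (x : Int) : Int :=
  let possibles := ranges.filter (fun r =>
    r.any (fun v => decide (v ≠ 0)) && (decide (r.getD 0 0 ≤ x) && decide (x ≤ r.getD 1 0)))
  PySem.List.maxD (possibles.map (fun r => r.getD 1 0)) (fun v => v) (-1)

def pvLoopA (ranges : List (List Int)) (areaSize x : Int) : List Int :=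
  if hx : x ≤ areaSize then
    if h1 : x < pvStepA ranges x then pvLoopA ranges areaSize (pvStepA ranges x + 1)
    else x :: pvLoopA ranges areaSize (x + 1)
  else []
termination_by (areaSize + 1 - x).toNat
decreasing_by all_goals (simp_wf; omega)

def get_possible_x_range (sensors : List ((Int × Int) × Int × Int)) (y : Int) (areaSize : Int) : List Int :=
  pvLoopA (sensors.map (fun s => pvAreaLineA s y)) areaSize 0

-- ===== PORT B =====
-- Source B's _interval helper
def pvIntervalB (sensor : (Int × Int) × Int × Int) (y : Int) : Option (Int × Int) :=
  let px := sensor.1.1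
  let py := sensor.1.2
  let d := sensor.2.1
  let dd := d - |py - y|
  if dd ≥ 0 then some (px - dd, px + dd) else none

-- Source B's inner while: advance the pointer over intervals whose left end is ≤ x,
-- keeping the running max of right ends (the pointer is the remaining suffix here)
def pvAbsorbB (ivals : List (Int × Int)) (x maxEnd : Int) : List (Int × Int) × Int :=
  match ivals with
  | [] => ([], maxEnd)
  | iv :: rest =>
    if iv.1 ≤ x then pvAbsorbB rest x (if iv.2 > maxEnd then iv.2 else maxEnd)
    else (iv :: rest, maxEnd)

-- Source B's outer while
def pvLoopB (ivals : List (Int × Int)) (areaSize x maxEnd : Int) : List Int :=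
  if hx : x ≤ areaSize then
    if h1 : (pvAbsorbB ivals x maxEnd).2 > x then
      pvLoopB (pvAbsorbB ivals x maxEnd).1 areaSize ((pvAbsorbB ivals x maxEnd).2 + 1) (pvAbsorbB ivals x maxEnd).2
    else x :: pvLoopB (pvAbsorbB ivals x maxEnd).1 areaSize (x + 1) (pvAbsorbB ivals x maxEnd).2
  else []
termination_by (areaSize + 1 - x).toNat
decreasing_by all_goals (simp_wf; omega)

def get_possible_x_range_alt (sensors : List ((Int × Int) × Int × Int)) (y : Int) (areaSize : Int) : List Int :=
  let ivals := sensors.foldl (fun acc s =>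
    match pvIntervalB s y with
    | some iv => acc ++ [iv]
    | none => acc) []
  pvLoopB (PySem.List.sorted ivals (fun t => t.1)) areaSize 0 (-1)

-- ===== PRECONDITION & SPEC =====
def Spec_get_possible_x_range (sensors : List ((Int × Int) × Int × Int)) (y : Int) (areaSize : Int) (out : List Int) : Prop := out = get_possible_x_range_alt sensors y areaSize
instance (sensors : List ((Int × Int) × Int × Int)) (y : Int) (areaSize : Int) (out : List Int) : Decidable (Spec_get_possible_x_range sensors y areaSize out) := by unfold Spec_get_possible_x_range; infer_instance

-- ===== CLAIM (what is proved, stated in full; the proofs are below) =====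
def Claim_equal_get_possible_x_range : Prop := ∀ (sensors : List ((Int × Int) × Int × Int)) (y : Int) (areaSize : Int), Dom_get_possible_x_range sensors y areaSize → Spec_get_possible_x_range sensors y areaSize (get_possible_x_range sensors y areaSize)

-- ===== LEMMAS AND PROOFS =====

-- per-sensor correspondence between A's range list and B's optional interval
lemma pvLine_cases (s : (Int × Int) × Int × Int) (y : Int) :
    (pvAreaLineA s y = [] ∧ pvIntervalB s y = none) ∨
    (∃ lo hi, pvAreaLineA s y = [lo, hi] ∧ pvIntervalB s y = some (lo, hi)) := by
  obtain ⟨⟨px, py⟩, d, e⟩ := s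
  simp only [pvAreaLineA, pvIntervalB]
  rcases abs_cases (py - y) with ⟨h1, h2⟩ | ⟨h1, h2⟩ <;>
    rw [h1] <;> split_ifs <;> first
      | (left; exact ⟨rfl, rfl⟩)
      | (right; exact ⟨_, _, rfl, rfl⟩)
      | (exfalso; omega)

-- Source B's building loop produces exactly the filterMap of _interval
lemma pvBuild_eq (y : Int) (sensors : List ((Int × Int) × Int × Int)) :
    ∀ acc : List (Int × Int),
      sensors.foldl (fun acc s =>
        match pvIntervalB s y with
        | some iv => acc ++ [iv]
        | none => acc) acc
      = acc ++ sensors.filterMap (fun s => pvIntervalB s y) := by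
  induction sensors with
  | nil => intro acc; simp
  | cons s t ih =>
      intro acc
      simp only [List.foldl_cons, List.filterMap_cons]
      cases h : pvIntervalB s y with
      | none => simpa [h] using ih acc
      | some iv => simp [ih (acc ++ [iv])]

-- the inner while is takeWhile/dropWhile with a running max
lemma pvAbsorb_spec (x : Int) :
    ∀ (ivals : List (Int × Int)) (m : Int),
      pvAbsorbB ivals x m =
        (ivals.dropWhile (fun iv => decide (iv.1 ≤ x)),
         ((ivals.takeWhile (fun iv => decide (iv.1 ≤ x))).map Prod.snd).foldl max m) := by
  intro ivals
  induction ivals with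
  | nil => intro m; simp [pvAbsorbB]
  | cons iv rest ih =>
      intro m
      by_cases h : iv.1 ≤ x
      · rw [pvAbsorbB, if_pos h, ih]
        have hmax : (if iv.2 > m then iv.2 else m) = max m iv.2 := by
          rw [max_def]; split_ifs <;> omega
        simp [h, hmax]
      · rw [pvAbsorbB, if_neg h]
        simp [h]

-- after the split point of a left-end-sorted list, every left end exceeds x
lemma pvDropWhile_gt (x : Int) :
    ∀ L : List (Int × Int), L.Pairwise (fun a b => a.1 ≤ b.1) →
      ∀ r ∈ L.dropWhile (fun iv => decide (iv.1 ≤ x)), x < r.1 := by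
  intro L
  induction L with
  | nil => intro _ r hr; simp at hr
  | cons a t ih =>
      intro hp r hr
      rw [List.pairwise_cons] at hp
      by_cases h : a.1 ≤ x
      · rw [List.dropWhile_cons_of_pos (by simpa using h)] at hr
        exact ih hp.2 r hr
      · rw [List.dropWhile_cons_of_neg (by simpa using h)] at hr
        rcases List.mem_cons.mp hr with hr | hr
        · subst hr; omega
        · have := hp.1 r hr; omega

-- the main loop equivalence
lemma pvLoop_eq (ranges : List (List Int)) (I L : List (Int × Int)) (areaSize : Int)
    (hshape : ∀ r ∈ ranges, r = [] ∨ ∃ lo hi, r = [lo, hi] ∧ (lo, hi) ∈ I)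
    (hBA : ∀ iv ∈ I, [iv.1, iv.2] ∈ ranges)
    (hperm : L.Perm I) (hsort : L.Pairwise (fun a b => a.1 ≤ b.1)) :
    ∀ (k : Nat) (x m : Int) (P rem : List (Int × Int)),
      (areaSize + 1 - x).toNat ≤ k → 0 ≤ x → L = P ++ rem →
      (∀ p ∈ P, p.1 ≤ x) → m = (P.map Prod.snd).foldl max (-1) →
      pvLoopA ranges areaSize x = pvLoopB rem areaSize x m := by
  intro k
  induction k with
  | zero =>
      intro x m P rem hk hx hsplit hP hm
      rw [pvLoopA, pvLoopB]
      rw [dif_neg (by omega), dif_neg (by omega)]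
  | succ k ih =>
      intro x m P rem hk hx hsplit hP hm
      by_cases hle : x ≤ areaSize
      · -- split `rem` at x: T is absorbed, R' stays
        set T := rem.takeWhile (fun iv => decide (iv.1 ≤ x)) with hT
        set R' := rem.dropWhile (fun iv => decide (iv.1 ≤ x)) with hR
        set P' := P ++ T with hP'def
        have habs : pvAbsorbB rem x m = (R', (T.map Prod.snd).foldl max m) := pvAbsorb_spec x rem m
        set m' := (P'.map Prod.snd).foldl max (-1) with hm'def
        have hfold : (T.map Prod.snd).foldl max m = m' := by
          rw [hm'def, hP'def, List.map_append, List.foldl_append, ← hm]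
        have hsplit' : L = P' ++ R' := by
          rw [hP'def, List.append_assoc, hT, hR, List.takeWhile_append_dropWhile, ← hsplit]
        have hPle : ∀ q ∈ P', q.1 ≤ x := by
          intro q hq
          rcases List.mem_append.mp hq with h | h
          · exact hP q h
          · rw [hT] at h
            exact of_decide_eq_true
              (List.mem_takeWhile_imp (p := fun iv : Int × Int => decide (iv.1 ≤ x)) h)
        have hremsort : rem.Pairwise (fun a b => a.1 ≤ b.1) :=
          (List.pairwise_append.mp (hsplit ▸ hsort)).2.1
        have hRgt : ∀ r ∈ R', x < r.1 := fun r hr =>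
          pvDropWhile_gt x rem hremsort r (hR ▸ hr)
        have hIP : ∀ iv ∈ I, iv.1 ≤ x → iv ∈ P' := by
          intro iv hiv hivle
          have hL : iv ∈ L := hperm.mem_iff.mpr hiv
          rcases List.mem_append.mp (hsplit' ▸ hL) with h | h
          · exact h
          · exact absurd (hRgt iv h) (by omega)
        have hPI : ∀ iv ∈ P', iv ∈ I := by
          intro iv hiv
          exact hperm.mem_iff.mp (hsplit' ▸ List.mem_append_left R' hiv)
        obtain ⟨hm'init, hm'ub⟩ := PySem.List.le_foldl_max (P'.map Prod.snd) (-1)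
        have hm'le : ∀ iv ∈ P', iv.2 ≤ m' := fun iv hiv =>
          hm'ub _ (List.mem_map_of_mem hiv)
        have hm'mem := PySem.List.foldl_max_mem (P'.map Prod.snd) (-1)
        -- A's per-step maximum vs m'
        set AM := (List.filter (fun r =>
            r.any (fun v => decide (v ≠ 0)) && (decide (r.getD 0 0 ≤ x) && decide (x ≤ r.getD 1 0))) ranges).map
            (fun r => r.getD 1 0) with hAM
        have hAub : ∀ v ∈ AM, v ≤ m' := by
          intro v hv
          rcases List.mem_map.mp hv with ⟨r, hrmem, hveq⟩
          rcases List.mem_filter.mp hrmem with ⟨hrr, hpred⟩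
          rcases hshape r hrr with rfl | ⟨lo, hi, rfl, hloI⟩
          · simp at hpred
          · simp only [List.any_cons, List.any_nil, List.getD, List.getElem?_cons_zero,
              List.getElem?_cons_succ, Option.getD_some, Bool.or_false, Bool.and_eq_true,
              Bool.or_eq_true, decide_eq_true_eq] at hpred hveq
            have hmem : (lo, hi) ∈ P' := hIP _ hloI hpred.2.1
            have := hm'le _ hmem
            omega
        have hstep_le : pvStepA ranges x ≤ m' := by
          rw [pvStepA]
          simp only [PySem.List.maxD, ← hAM]
          cases hmx : PySem.List.max? AM (fun v => v) with
          | none => simpa using hm'init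
          | some mx =>
              simp only [Option.getD_some]
              exact hAub mx (PySem.List.max?_mem hmx)
        have hstep_eq : x < m' → pvStepA ranges x = m' := by
          intro hxm
          have hm'AM : m' ∈ AM := by
            rcases hm'mem with h | h
            · omega
            · rcases List.mem_map.mp h with ⟨iv, hivP, hiv2⟩
              have hivI := hPI iv hivP
              have h1 : iv.1 ≤ x := hPle iv hivP
              refine List.mem_map.mpr ⟨[iv.1, iv.2], List.mem_filter.mpr ⟨hBA iv hivI, ?_⟩, ?_⟩
              · simp only [List.any_cons, List.any_nil, List.getD, List.getElem?_cons_zero,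
                  List.getElem?_cons_succ, Option.getD_some, Bool.or_false, Bool.and_eq_true,
                  Bool.or_eq_true, decide_eq_true_eq]
                omega
              · simp only [List.getD, List.getElem?_cons_succ, List.getElem?_cons_zero,
                  Option.getD_some]
                omega
          refine le_antisymm hstep_le ?_
          rw [pvStepA]
          simp only [PySem.List.maxD, ← hAM]
          cases hmx : PySem.List.max? AM (fun v => v) with
          | none =>
              rw [PySem.List.max?_eq_none_iff] at hmx
              rw [hmx] at hm'AM
              simp at hm'AM
          | some mx =>
              simp only [Option.getD_some]
              exact PySem.List.max?_isMax hmx m' hm'AM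
        -- take the same branch on both sides and recurse
        rw [pvLoopA, pvLoopB, dif_pos hle, dif_pos hle, habs]
        simp only [hfold]
        by_cases hgt : m' > x
        · rw [dif_pos (by rw [hstep_eq hgt]; exact hgt), dif_pos hgt, hstep_eq hgt]
          exact ih (m' + 1) m' P' R' (by omega) (by omega) hsplit'
            (fun q hq => by have := hPle q hq; omega) rfl
        · rw [dif_neg (by have := hstep_le; omega), dif_neg hgt]
          congr 1
          exact ih (x + 1) m' P' R' (by omega) (by omega) hsplit'
            (fun q hq => by have := hPle q hq; omega) rfl
      · rw [pvLoopA, pvLoopB, dif_neg hle, dif_neg hle]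

-- ===== VERDICT (by name: the statement is the Claim_ definition above) =====
theorem get_possible_x_range_spec : Claim_equal_get_possible_x_range := by
  intro sensors y areaSize _
  unfold Spec_get_possible_x_range get_possible_x_range get_possible_x_range_alt
  rw [pvBuild_eq]
  simp only [List.nil_append]
  set I := sensors.filterMap (fun s => pvIntervalB s y) with hI
  set L := PySem.List.sorted I (fun t => t.1) with hLdef
  have hshape : ∀ r ∈ sensors.map (fun s => pvAreaLineA s y),
      r = [] ∨ ∃ lo hi, r = [lo, hi] ∧ (lo, hi) ∈ I := by
    intro r hr
    rcases List.mem_map.mp hr with ⟨s, hs, rfl⟩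
    rcases pvLine_cases s y with ⟨h1, _⟩ | ⟨lo, hi, h1, h2⟩
    · exact Or.inl h1
    · exact Or.inr ⟨lo, hi, h1, List.mem_filterMap.mpr ⟨s, hs, h2⟩⟩
  have hBA : ∀ iv ∈ I, [iv.1, iv.2] ∈ sensors.map (fun s => pvAreaLineA s y) := by
    intro iv hiv
    rcases List.mem_filterMap.mp hiv with ⟨s, hs, hsome⟩
    rcases pvLine_cases s y with ⟨_, h2⟩ | ⟨lo, hi, h1, h2⟩ <;> rw [h2] at hsome
    · cases hsome
    · obtain rfl : (lo, hi) = iv := Option.some.inj hsome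
      exact List.mem_map.mpr ⟨s, hs, h1⟩
  exact pvLoop_eq _ I L areaSize hshape hBA (PySem.List.sorted_perm I _ _)
    (PySem.List.sorted_pairwise I _) (areaSize + 1).toNat 0 (-1) [] L
    (by omega) le_rfl (by simp) (by simp) rfl
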